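-- pv_equiv track=rewrite | github.com/eroge-69/PyToExe | python-files/DLC.py | check_files_integrity
-- ===== SOURCE A (Python) =====
-- def check_files_integrity(files, is_vehicle=False):
--     """Перевіряє наявність необхідних файлів"""
--     if not files:
--         return False, "Не знайдено жодного файлу"
--
--     if is_vehicle:
--         has_yft = any(f.endswith('.yft') for f in files)
--         has_ytd = any(f.endswith('.ytd') for f in files)
--         if not has_yft:
--             return False, "Відсутній файл моделі (.yft)"
--         if not has_ytd:
--             return False, "Відсутній файл текстур (.ytd)"
--     else:
--         has_ymap = any(f.endswith('.ymap') for f in files)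
--         if not has_ymap:
--             return False, "Відсутній файл карти (.ymap)"
--
--     return True, "Усі необхідні файли знайдено"
-- ===== SOURCE B (Python) =====
-- def check_files_integrity(files, is_vehicle=False):
--     """Build the set of file extensions once, then answer each requirement by a set lookup."""
--     if not files:
--         return False, "Не знайдено жодного файлу"
--
--     exts = {f.rsplit('.', 1)[-1] if '.' in f else '' for f in files}
--
--     if is_vehicle:
--         if 'yft' not in exts:
--             return False, "Відсутній файл моделі (.yft)"
--         if 'ytd' not in exts:
--             return False, "Відсутній файл текстур (.ytd)"
--     else:
--         if 'ymap' not in exts: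
--             return False, "Відсутній файл карти (.ymap)"
--
--     return True, "Усі необхідні файли знайдено"
-- ===== Notes on version B (the rewrite author's own statement) =====
-- stated objective: idiomatic
-- what changed: B builds a set of each file's final-dot extension in one pass and answers each requirement by a set membership test, replacing A's repeated any(endswith) scans over the file list.
import Mathlib
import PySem

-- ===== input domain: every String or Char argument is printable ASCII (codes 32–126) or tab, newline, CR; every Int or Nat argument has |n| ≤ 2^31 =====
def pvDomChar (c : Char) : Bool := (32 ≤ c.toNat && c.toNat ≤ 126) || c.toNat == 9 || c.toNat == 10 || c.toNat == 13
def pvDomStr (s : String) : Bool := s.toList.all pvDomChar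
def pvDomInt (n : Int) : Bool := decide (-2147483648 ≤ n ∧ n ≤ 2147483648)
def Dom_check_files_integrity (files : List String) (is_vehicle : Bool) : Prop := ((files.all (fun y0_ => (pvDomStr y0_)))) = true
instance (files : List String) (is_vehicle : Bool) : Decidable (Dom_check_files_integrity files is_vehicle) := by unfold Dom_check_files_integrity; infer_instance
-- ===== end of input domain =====

-- B builds the set of final-dot extensions once and answers by set membership, instead of A's repeated any(endswith) scans (idiomatic restructuring, same cost).


-- ===== PORT A =====
def check_files_integrity (files : List String) (is_vehicle : Bool) : Bool × String :=
  if files = [] then (false, "Не знайдено жодного файлу")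
  else
    if is_vehicle then
      let has_yft := files.any (fun f => PySem.Str.endswith f ".yft")
      let has_ytd := files.any (fun f => PySem.Str.endswith f ".ytd")
      if !has_yft then (false, "Відсутній файл моделі (.yft)")
      else if !has_ytd then (false, "Відсутній файл текстур (.ytd)")
      else (true, "Усі необхідні файли знайдено")
    else
      let has_ymap := files.any (fun f => PySem.Str.endswith f ".ymap")
      if !has_ymap then (false, "Відсутній файл карти (.ymap)")
      else (true, "Усі необхідні файли знайдено")

-- ===== PORT B =====
-- hand port of f.rsplit('.', 1)[-1] (PySem has no rsplit): the maximal suffix of f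
-- after the last '.', i.e. reverse of the dot-free prefix of the reversed characters; exact.
def pvExtOf (f : String) : String :=
  if '.' ∈ f.toList then String.ofList ((f.toList.reverse.takeWhile (fun c => c != '.')).reverse)
  else ""

def check_files_integrity_alt (files : List String) (is_vehicle : Bool) : Bool × String :=
  if files = [] then (false, "Не знайдено жодного файлу")
  else
    let exts : PySem.Set String := PySem.Set.ofList (files.map pvExtOf)
    if is_vehicle then
      if !(PySem.Set.contains exts "yft") then (false, "Відсутній файл моделі (.yft)")
      else if !(PySem.Set.contains exts "ytd") then (false, "Відсутній файл текстур (.ytd)")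
      else (true, "Усі необхідні файли знайдено")
    else
      if !(PySem.Set.contains exts "ymap") then (false, "Відсутній файл карти (.ymap)")
      else (true, "Усі необхідні файли знайдено")

-- ===== PRECONDITION & SPEC =====
def Spec_check_files_integrity (files : List String) (is_vehicle : Bool) (out : Bool × String) : Prop := out = check_files_integrity_alt files is_vehicle
instance (files : List String) (is_vehicle : Bool) (out : Bool × String) : Decidable (Spec_check_files_integrity files is_vehicle out) := by unfold Spec_check_files_integrity; infer_instance

-- ===== CLAIM (what is proved, stated in full; the proofs are below) =====
def Claim_equal_check_files_integrity : Prop := ∀ (files : List String) (is_vehicle : Bool), Dom_check_files_integrity files is_vehicle → Spec_check_files_integrity files is_vehicle (check_files_integrity files is_vehicle)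

-- ===== LEMMAS AND PROOFS =====

-- takeWhile of a dot-free block followed by '.' is the block
lemma pv_takeWhile_append (a b : List Char) (ha : '.' ∉ a) :
    (a ++ '.' :: b).takeWhile (fun c => c != '.') = a := by
  induction a with
  | nil => simp
  | cons x xs ih =>
    simp only [List.mem_cons, not_or] at ha
    have hx : (x != '.') = true := by simp [bne]; exact fun h => ha.1 h.symm
    simp [hx, ih ha.2]

-- if '.' occurs in l, dropWhile (≠ '.') l starts with '.'
lemma pv_dropWhile_dot (l : List Char) (h : '.' ∈ l) :
    ∃ d, l.dropWhile (fun c => c != '.') = '.' :: d := by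
  induction l with
  | nil => simp at h
  | cons x xs ih =>
    by_cases hx : x = '.'
    · subst hx; exact ⟨xs, by simp [List.dropWhile]⟩
    · have : '.' ∈ xs := by
        rcases List.mem_cons.mp h with h1 | h1
        · exact absurd h1.symm hx
        · exact h1
      rcases ih this with ⟨d, hd⟩
      exact ⟨d, by rw [List.dropWhile_cons_of_pos (by simp [bne, hx])]; exact hd⟩

-- core: endswith '.'++e  ↔  final-dot extension is e (e nonempty, dot-free)
lemma pv_endswith_iff_ext (f : String) (e : List Char) (he : e ≠ []) (hd : '.' ∉ e) :
    PySem.Str.endswith f (String.ofList ('.' :: e)) = true ↔ pvExtOf f = String.ofList e := by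
  have hbridge : PySem.Str.endswith f (String.ofList ('.' :: e)) = PySem.Chars.endswith f.toList ('.' :: e) := by
    simp
  rw [hbridge, PySem.Chars.endswith_iff]
  constructor
  · rintro ⟨p, hp⟩
    have hmem : '.' ∈ f.toList := by rw [← hp]; simp
    have hrev : f.toList.reverse = e.reverse ++ '.' :: p.reverse := by
      rw [← hp]; simp
    have hdr : '.' ∉ e.reverse := by simpa using hd
    unfold pvExtOf
    rw [if_pos hmem, hrev, pv_takeWhile_append _ _ hdr]
    simp
  · intro hext
    unfold pvExtOf at hext
    by_cases hmem : '.' ∈ f.toList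
    · rw [if_pos hmem] at hext
      have htk : (f.toList.reverse.takeWhile (fun c => c != '.')).reverse = e := by
        have h2 := congrArg String.toList hext
        simpa using h2
      have hmemr : '.' ∈ f.toList.reverse := by simpa using hmem
      rcases pv_dropWhile_dot f.toList.reverse hmemr with ⟨d, hdw⟩
      have hsplit : f.toList.reverse
          = f.toList.reverse.takeWhile (fun c => c != '.') ++ '.' :: d := by
        conv_lhs => rw [← List.takeWhile_append_dropWhile (p := fun c => c != '.') (l := f.toList.reverse)]
        rw [hdw]
      refine ⟨d.reverse, ?_⟩
      have : f.toList = d.reverse ++ '.' :: (f.toList.reverse.takeWhile (fun c => c != '.')).reverse := by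
        have := congrArg List.reverse hsplit
        simpa using this
      rw [this, htk]
    · rw [if_neg hmem] at hext
      exact absurd (congrArg String.toList hext.symm) (by simp; exact he)

-- the scan equals the set lookup
lemma pv_any_eq_contains (files : List String) (e : List Char) (he : e ≠ []) (hd : '.' ∉ e) :
    (files.any (fun f => PySem.Str.endswith f (String.ofList ('.' :: e))))
      = PySem.Set.contains (PySem.Set.ofList (files.map pvExtOf)) (String.ofList e) := by
  rw [Bool.eq_iff_iff]
  simp only [List.any_eq_true]
  constructor
  · rintro ⟨f, hf, hend⟩
    have := (pv_endswith_iff_ext f e he hd).mp hend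
    simp only [PySem.Set.contains_iff, PySem.Set.mem_ofList, List.mem_map]
    exact ⟨f, hf, this⟩
  · intro h
    simp only [PySem.Set.contains_iff, PySem.Set.mem_ofList, List.mem_map] at h
    rcases h with ⟨f, hf, hext⟩
    exact ⟨f, hf, (pv_endswith_iff_ext f e he hd).mpr hext⟩

-- ===== VERDICT (by name: the statement is the Claim_ definition above) =====
theorem check_files_integrity_spec : Claim_equal_check_files_integrity := by
  intro files is_vehicle _
  unfold Spec_check_files_integrity check_files_integrity check_files_integrity_alt
  by_cases hnil : files = []
  · simp [hnil]
  · have hyft : (files.any fun f => PySem.Str.endswith f ".yft")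
        = PySem.Set.contains (PySem.Set.ofList (files.map pvExtOf)) "yft" :=
      pv_any_eq_contains files ['y','f','t'] (by simp) (by decide)
    have hytd : (files.any fun f => PySem.Str.endswith f ".ytd")
        = PySem.Set.contains (PySem.Set.ofList (files.map pvExtOf)) "ytd" :=
      pv_any_eq_contains files ['y','t','d'] (by simp) (by decide)
    have hymap : (files.any fun f => PySem.Str.endswith f ".ymap")
        = PySem.Set.contains (PySem.Set.ofList (files.map pvExtOf)) "ymap" :=
      pv_any_eq_contains files ['y','m','a','p'] (by simp) (by decide)
    rw [if_neg hnil, if_neg hnil]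
    cases is_vehicle <;> simp only [if_true, if_false, Bool.false_eq_true, hyft, hytd, hymap]
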